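-- pv_equiv track=rewrite | github.com/BlackCodingKitten/PyClassroomExercise | Esercitazione in aula/14-11-2023/es.py | azzeraCoppie
-- ===== SOURCE A (Python) =====
-- def azzeraCoppie(v , value =0, i=0):
--     if i >= len(v):
--         return v
--     else:
--         if(value !=0 and value==v[i]):
--             v[i]=0
--         else:
--             value = v[i]
--             if  (i+1)<len(v) and value == v[i+1]:
--                 v[i]=0
--         return azzeraCoppie(v, value, i+1)
-- ===== SOURCE B (Python) =====
-- def azzeraCoppie(v, value=0, i=0):
--     n = len(v)
--     prev = value
--     for j in range(i, n):
--         cur = v[j]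
--         if (prev != 0 and cur == prev) or ((prev == 0 or cur != prev) and j + 1 < n and cur == v[j + 1]):
--             v[j] = 0
--         prev = cur
--     return v
-- ===== Notes on version B (the rewrite author's own statement) =====
-- stated objective: simpler
-- what changed: The tail recursion with a conditionally-updated carried value and nested branches is replaced by a single for-loop over range(i, len(v)) whose body uses the invariant that the carried value always equals the element just read, so the state update becomes unconditional and the two zeroing branches fuse into one boolean condition.
import Mathlib
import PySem

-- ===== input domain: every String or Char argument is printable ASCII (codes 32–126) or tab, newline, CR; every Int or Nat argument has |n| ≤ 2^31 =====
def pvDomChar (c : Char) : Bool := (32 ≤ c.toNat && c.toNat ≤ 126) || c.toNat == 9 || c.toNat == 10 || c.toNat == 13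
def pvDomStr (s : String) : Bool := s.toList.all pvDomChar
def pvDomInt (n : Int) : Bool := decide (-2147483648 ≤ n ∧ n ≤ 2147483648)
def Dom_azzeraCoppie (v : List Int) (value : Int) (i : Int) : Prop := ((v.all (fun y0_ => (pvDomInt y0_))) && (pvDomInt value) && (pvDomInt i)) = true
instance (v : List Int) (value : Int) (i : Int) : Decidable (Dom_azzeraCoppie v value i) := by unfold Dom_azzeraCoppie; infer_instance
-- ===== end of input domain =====

-- B replaces A's tail recursion (conditional carried value, nested branches) by one for-loop with an
-- unconditional state update and a single fused zeroing condition; equally fast, constant extra space.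
-- Both Pythons mutate v in place and return it; the equivalence proved is about the returned list.

-- ===== PORT A =====
def azzeraCoppie (v : List Int) (value : Int) (i : Int) : List Int :=
  if _h : (v.length : Int) ≤ i then v
  else
    match PySem.List.pyGet? v i with
    | none => []   -- Python raises IndexError here (i < -len(v)); excluded by Pre_
    | some vi =>
      if value ≠ 0 ∧ value = vi then
        azzeraCoppie (PySem.List.pySetD v i 0) value (i + 1)
      else
        if i + 1 < (v.length : Int) ∧ PySem.List.pyGet? v (i + 1) = some vi then
          azzeraCoppie (PySem.List.pySetD v i 0) vi (i + 1)
        else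
          azzeraCoppie v vi (i + 1)
termination_by ((v.length : Int) - i).toNat
decreasing_by
  · simp only [PySem.List.length_pySetD]; omega
  · simp only [PySem.List.length_pySetD]; omega
  · omega

-- ===== PORT B =====
-- loop body of Source B: state is (v, prev); cur = v[j]; zero v[j] on the fused condition; prev := cur
def stepB (n : Int) (st : List Int × Int) (j : Int) : List Int × Int :=
  let cur := PySem.List.pyGetD st.1 j 0
  let w := if (st.2 ≠ 0 ∧ cur = st.2) ∨
              ((st.2 = 0 ∨ cur ≠ st.2) ∧ j + 1 < n ∧ cur = PySem.List.pyGetD st.1 (j + 1) 0)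
           then PySem.List.pySetD st.1 j 0 else st.1
  (w, cur)

def azzeraCoppie_alt (v : List Int) (value : Int) (i : Int) : List Int :=
  ((PySem.List.pyRange i (v.length : Int) 1).foldl (stepB (v.length : Int)) (v, value)).1

-- ===== PRECONDITION & SPEC =====
-- Pre_ excludes exactly the inputs where the Python A raises IndexError (i < -len(v)); B raises there too.
def Pre_azzeraCoppie (v : List Int) (value : Int) (i : Int) : Prop := -(v.length : Int) ≤ i
instance (v : List Int) (value : Int) (i : Int) : Decidable (Pre_azzeraCoppie v value i) := by
  unfold Pre_azzeraCoppie; infer_instance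
def pvWitness_azzeraCoppie : List Int × Int × Int := ([1, 1, 2, 3, 3], 0, 0)

def Spec_azzeraCoppie (v : List Int) (value : Int) (i : Int) (out : List Int) : Prop := out = azzeraCoppie_alt v value i
instance (v : List Int) (value : Int) (i : Int) (out : List Int) : Decidable (Spec_azzeraCoppie v value i out) := by unfold Spec_azzeraCoppie; infer_instance

-- ===== CLAIM (what is proved, stated in full; the proofs are below) =====
def Claim_equal_azzeraCoppie : Prop := ∀ (v : List Int) (value : Int) (i : Int), Dom_azzeraCoppie v value i → Pre_azzeraCoppie v value i → Spec_azzeraCoppie v value i (azzeraCoppie v value i)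

-- ===== LEMMAS AND PROOFS =====

-- under InRange, indexing returns `some` of the defaulted value
lemma pyGet_eq_some_getD (xs : List Int) (i : Int) (h : PySem.Raise.InRange xs.length i) :
    PySem.List.pyGet? xs i = some (PySem.List.pyGetD xs i 0) := by
  obtain ⟨h1, h2⟩ := h
  simp only [PySem.List.pyGet?, PySem.List.pyGetD, PySem.List.pyIdx?]
  by_cases h0 : 0 ≤ i
  · rw [if_pos h0, if_pos h2]
    have hlt : i.toNat < xs.length := by omega
    simp [List.getElem?_eq_getElem hlt]
  · rw [if_neg h0, if_pos h1]
    have hlt : xs.length - (-i).toNat < xs.length := by omega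
    simp [List.getElem?_eq_getElem hlt]

lemma main_lemma : ∀ (k : Nat) (v : List Int) (value i : Int),
    ((v.length : Int) - i).toNat ≤ k → -(v.length : Int) ≤ i →
    azzeraCoppie v value i =
      ((PySem.List.pyRange i (v.length : Int) 1).foldl (stepB (v.length : Int)) (v, value)).1 := by
  intro k
  induction k with
  | zero =>
    intro v value i hk hp
    have hni : (v.length : Int) ≤ i := by omega
    rw [azzeraCoppie.eq_def, dif_pos hni, PySem.List.pyRange_one_eq_nil hni]; rfl
  | succ k ih =>
    intro v value i hk hp
    by_cases hni : (v.length : Int) ≤ i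
    · rw [azzeraCoppie.eq_def, dif_pos hni, PySem.List.pyRange_one_eq_nil hni]; rfl
    · push Not at hni
      have hget := pyGet_eq_some_getD v i ⟨hp, hni⟩
      set vi := PySem.List.pyGetD v i 0 with hvi
      have hlen : (PySem.List.pySetD v i 0).length = v.length := PySem.List.length_pySetD v i 0
      rw [azzeraCoppie.eq_def, dif_neg (not_le.mpr hni), hget,
          PySem.List.pyRange_one_cons hni, List.foldl_cons]
      simp only [stepB, ← hvi]
      by_cases hb1 : value ≠ 0 ∧ value = vi
      · rw [if_pos hb1, if_pos (Or.inl ⟨hb1.1, hb1.2.symm⟩)]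
        rw [ih (PySem.List.pySetD v i 0) value (i + 1) (by rw [hlen]; omega) (by rw [hlen]; omega),
            hlen, hb1.2]
      · rw [if_neg hb1]
        by_cases hb2 : i + 1 < (v.length : Int) ∧ PySem.List.pyGet? v (i + 1) = some vi
        · have hget2 := pyGet_eq_some_getD v (i + 1) ⟨by omega, hb2.1⟩
          have hvi2 : vi = PySem.List.pyGetD v (i + 1) 0 := by
            have := hb2.2.symm.trans hget2
            exact Option.some_injective _ this.symm |>.symm
          rw [if_pos hb2, if_pos (Or.inr ⟨by tauto, hb2.1, hvi2⟩)]
          rw [ih (PySem.List.pySetD v i 0) vi (i + 1) (by rw [hlen]; omega) (by rw [hlen]; omega),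
              hlen]
        · have hC : ¬ ((value ≠ 0 ∧ vi = value) ∨
              ((value = 0 ∨ vi ≠ value) ∧ i + 1 < (v.length : Int) ∧
                vi = PySem.List.pyGetD v (i + 1) 0)) := by
            rintro (⟨h1, h2⟩ | ⟨_, h3, h4⟩)
            · exact hb1 ⟨h1, h2.symm⟩
            · have hget2 := pyGet_eq_some_getD v (i + 1) ⟨by omega, h3⟩
              exact hb2 ⟨h3, by rw [hget2, h4]⟩
          rw [if_neg hb2, if_neg hC]
          exact ih v vi (i + 1) (by omega) (by omega)

-- ===== VERDICT (by name: the statement is the Claim_ definition above) =====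
theorem azzeraCoppie_spec : Claim_equal_azzeraCoppie := by
  intro v value i _hd hp
  unfold Spec_azzeraCoppie azzeraCoppie_alt
  exact main_lemma ((v.length : Int) - i).toNat v value i le_rfl hp
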